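-- pv_equiv track=rewrite | github.com/diegoami/DA_Zalando_test | brackets.py | solution
-- ===== SOURCE A (Python) =====
-- def solution(S):
--     if (len(S) == 0):
--         return 0
--     TOB = len([x for x in S if x == '('])
--     TCB = len([x for x in S if x == ')'])
--     ob, cb = 0, 0
--     result = len(S)
--
--     for i, e in enumerate(S):
--         if ob == TCB - cb:
--             result = i
--             break
--         if e == '(':
--             ob += 1
--         if e == ')':
--             cb += 1
--     #   assert result == slow_solution(S)
--     return result
-- ===== SOURCE B (Python) =====
-- def solution(S):
--     TCB = S.count(')')
--     if TCB == 0: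
--         return 0
--     parens = [i for i, e in enumerate(S) if e == '(' or e == ')']
--     return parens[TCB - 1] + 1
-- ===== Notes on version B (the rewrite author's own statement) =====
-- stated objective: simpler
-- what changed: Replaces A's counter-simulating scan with early break (ob == TCB - cb) by a direct lookup: since the break fires exactly when the number of parentheses seen equals TCB, B returns one past the position of the TCB-th parenthesis (0 if there is no ')').
import Mathlib
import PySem

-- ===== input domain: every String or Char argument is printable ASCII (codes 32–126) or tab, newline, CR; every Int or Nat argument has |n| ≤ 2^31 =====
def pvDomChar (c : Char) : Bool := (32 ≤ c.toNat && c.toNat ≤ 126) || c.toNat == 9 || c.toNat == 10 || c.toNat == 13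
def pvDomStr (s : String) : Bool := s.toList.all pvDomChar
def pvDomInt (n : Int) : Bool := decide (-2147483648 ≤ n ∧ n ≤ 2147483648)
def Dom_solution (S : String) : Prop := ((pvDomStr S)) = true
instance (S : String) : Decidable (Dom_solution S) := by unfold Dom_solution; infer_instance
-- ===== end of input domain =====

-- B replaces A's counter-simulation scan (break when ob == TCB - cb) by a direct
-- lookup: the answer is one past the position of the TCB-th parenthesis (objective: simpler).

-- ===== PORT A =====
-- the for-loop of A: state ob, cb; `result` is the value returned if the loop never breaks
def solLoopA (TCB : Int) : List (Int × Char) → Int → Int → Int → Int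
  | [], _, _, res => res
  | (i, e) :: rest, ob, cb, res =>
    if ob = TCB - cb then i
    else
      let ob' := if e = '(' then ob + 1 else ob
      let cb' := if e = ')' then cb + 1 else cb
      solLoopA TCB rest ob' cb' res

def solution (S : String) : Int :=
  let cs := S.toList
  if cs.length = 0 then 0
  else
    let _TOB : Int := ((cs.filter (fun x => x = '(')).length : Int)
    let TCB : Int := ((cs.filter (fun x => x = ')')).length : Int)
    solLoopA TCB (PySem.List.enumerate cs 0) 0 0 (cs.length : Int)

-- ===== PORT B =====
def solution_alt (S : String) : Int :=
  let TCB : Int := (PySem.Str.count S ")" : Int)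
  if TCB = 0 then 0
  else
    let parens : List Int :=
      ((PySem.List.enumerate S.toList 0).filter (fun p => p.2 == '(' || p.2 == ')')).map (·.1)
    -- parens[TCB-1]: always in range (1 ≤ TCB ≤ number of parentheses), so pyGetD's default is unreachable
    PySem.List.pyGetD parens (TCB - 1) 0 + 1

-- ===== PRECONDITION & SPEC =====
def Spec_solution (S : String) (out : Int) : Prop := out = solution_alt S
instance (S : String) (out : Int) : Decidable (Spec_solution S out) := by unfold Spec_solution; infer_instance

-- ===== CLAIM (what is proved, stated in full; the proofs are below) =====
def Claim_equal_solution : Prop := ∀ (S : String), Dom_solution S → Spec_solution S (solution S)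

-- ===== LEMMAS AND PROOFS =====

-- `g cs k t res`: A's loop with the two counters merged into the single remaining-parens budget t
def gLoop : List Char → Int → Int → Int → Int
  | [], _, _, res => res
  | c :: cs, k, t, res =>
    if t = 0 then k
    else gLoop cs (k + 1) (t - (if c = '(' ∨ c = ')' then 1 else 0)) res

-- positions (offset k) of parenthesis characters
def posFrom : Int → List Char → List Int
  | _, [] => []
  | k, c :: cs => if c = '(' ∨ c = ')' then k :: posFrom (k + 1) cs else posFrom (k + 1) cs

lemma loopA_eq_g (cs : List Char) : ∀ (TCB k ob cb res : Int),
    solLoopA TCB (PySem.List.enumerate cs k) ob cb res = gLoop cs k (TCB - ob - cb) res := by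
  induction cs with
  | nil => intro TCB k ob cb res; simp [PySem.List.enumerate_nil, solLoopA, gLoop]
  | cons c cs ih =>
    intro TCB k ob cb res
    rw [PySem.List.enumerate_cons]
    by_cases h0 : ob = TCB - cb
    · have hz : TCB - ob - cb = 0 := by omega
      simp only [solLoopA, gLoop, if_pos h0, if_pos hz]
    · have hz : ¬ (TCB - ob - cb = 0) := by omega
      simp only [solLoopA, gLoop, if_neg h0, if_neg hz]
      rw [ih]
      congr 1
      by_cases h1 : c = '('
      · have h2 : ¬ c = ')' := by subst h1; decide
        simp only [if_pos h1, if_neg h2, if_pos (Or.inl h1)]; omega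
      · by_cases h2 : c = ')'
        · simp only [if_neg h1, if_pos h2, if_pos (Or.inr h2)]; omega
        · have h3 : ¬ (c = '(' ∨ c = ')') := by tauto
          simp only [if_neg h1, if_neg h2, if_neg h3]; omega

lemma filter_enum_eq_posFrom (cs : List Char) : ∀ (k : Int),
    ((PySem.List.enumerate cs k).filter (fun p => p.2 == '(' || p.2 == ')')).map (·.1)
      = posFrom k cs := by
  induction cs with
  | nil => intro k; simp [PySem.List.enumerate_nil, posFrom]
  | cons c cs ih =>
    intro k
    rw [PySem.List.enumerate_cons]
    by_cases h : c = '(' ∨ c = ')'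
    · have hb : (c == '(' || c == ')') = true := by
        rcases h with h | h <;> simp [h]
      simp [List.filter_cons, hb, posFrom, h, ih]
    · have hb : (c == '(' || c == ')') = false := by
        push_neg at h; simp [h.1, h.2]
      simp [List.filter_cons, hb, posFrom, h, ih]

lemma length_posFrom (cs : List Char) : ∀ (k : Int),
    (posFrom k cs).length = cs.countP (fun c => c == '(' || c == ')') := by
  induction cs with
  | nil => intro k; simp [posFrom]
  | cons c cs ih =>
    intro k
    by_cases h : c = '(' ∨ c = ')'
    · have hb : (c == '(' || c == ')') = true := by rcases h with h | h <;> simp [h]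
      simp [posFrom, h, List.countP_cons, hb, ih]
    · have hb : (c == '(' || c == ')') = false := by push_neg at h; simp [h.1, h.2]
      simp [posFrom, h, List.countP_cons, hb, ih]

lemma gLoop_zero (cs : List Char) : ∀ (k res : Int), res = k + cs.length →
    gLoop cs k 0 res = k := by
  cases cs with
  | nil => intro k res h; simp [gLoop] at h ⊢; omega
  | cons c cs => intro k res h; simp [gLoop]

lemma gLoop_pos (cs : List Char) : ∀ (k t res : Int), 0 < t →
    t ≤ ((posFrom k cs).length : Int) → res = k + cs.length →
    gLoop cs k t res = PySem.List.pyGetD (posFrom k cs) (t - 1) 0 + 1 := by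
  induction cs with
  | nil =>
    intro k t res ht hle _
    simp [posFrom] at hle; omega
  | cons c cs ih =>
    intro k t res ht hle hres
    simp only [gLoop, if_neg (by omega : ¬ t = 0)]
    by_cases h : c = '(' ∨ c = ')'
    · rw [if_pos h]
      have hpos : posFrom k (c :: cs) = k :: posFrom (k + 1) cs := by simp [posFrom, h]
      rw [hpos] at hle ⊢
      by_cases h1 : t = 1
      · subst h1
        have e1 : gLoop cs (k + 1) (1 - 1) res = k + 1 := by
          norm_num
          exact gLoop_zero cs (k + 1) res (by simp at hres ⊢; omega)
        rw [e1]
        norm_num [PySem.List.pyGetD_zero_cons]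
      · have ht' : 0 < t - 1 := by omega
        have hle' : t - 1 ≤ ((posFrom (k + 1) cs).length : Int) := by
          simp at hle; omega
        rw [ih (k + 1) (t - 1) res ht' hle' (by simp at hres ⊢; omega)]
        have h0 : 0 ≤ t - 1 - 1 := by omega
        have hlt : t - 1 - 1 < ((posFrom (k + 1) cs).length : Int) := by omega
        rw [PySem.List.pyGetD_eq_getElem _ _ h0 hlt,
            PySem.List.pyGetD_eq_getElem _ _ (by omega : (0:Int) ≤ t - 1)
              (by simp; omega : t - 1 < ((k :: posFrom (k + 1) cs).length : Int))]
        congr 1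
        have h3 : (t - 1).toNat = (t - 1 - 1).toNat + 1 := by omega
        simp only [h3, List.getElem_cons_succ]
    · rw [if_neg h]
      have hpos : posFrom k (c :: cs) = posFrom (k + 1) cs := by simp [posFrom, h]
      rw [hpos] at hle ⊢
      rw [show t - (0 : Int) = t by omega]
      exact ih (k + 1) t res ht hle (by simp at hres ⊢; omega)

-- s.count(c) for a single character is List.count
lemma count_go_single (c : Char) : ∀ (l : List Char) (fuel acc : Nat), l.length ≤ fuel →
    PySem.Chars.count.go [c] fuel l acc = acc + l.count c := by
  intro l
  induction l with
  | nil =>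
    intro fuel acc _
    cases fuel <;> simp [PySem.Chars.count.go]
  | cons x t ih =>
    intro fuel acc hf
    cases fuel with
    | zero => simp at hf
    | succ f =>
      have hf' : t.length ≤ f := by simp at hf; omega
      rw [PySem.Chars.count.go.eq_def]
      by_cases h : c = x
      · have hp : List.isPrefixOf [c] (x :: t) = true := by simp [List.isPrefixOf, h]
        simp only [hp, List.length_singleton, List.drop_succ_cons, List.drop_zero]
        rw [ih f (acc + 1) hf', List.count_cons]
        simp [h.symm]; omega
      · have hp : List.isPrefixOf [c] (x :: t) = false := by simp [List.isPrefixOf, h]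
        simp only [hp]
        rw [if_neg (by simp), ih f acc hf', List.count_cons]
        have hb : (x == c) = false := by simp [Ne.symm h]
        simp [hb]

lemma str_count_close (S : String) :
    PySem.Str.count S ")" = S.toList.count ')' := by
  rw [PySem.Str.count_eq]
  have h1 : (")" : String).toList = [')'] := by decide
  rw [h1]
  unfold PySem.Chars.count
  rw [if_neg (by decide)]
  simpa using count_go_single ')' S.toList S.toList.length 0 le_rfl

lemma count_le_countP (cs : List Char) :
    cs.count ')' ≤ cs.countP (fun c => c == '(' || c == ')') := by
  unfold List.count
  apply List.countP_mono_left
  intro c _ h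
  simp at h ⊢
  right; exact h

-- ===== VERDICT (by name: the statement is the Claim_ definition above) =====
theorem solution_spec : Claim_equal_solution := by
  intro S _
  unfold Spec_solution
  simp only [solution, solution_alt]
  rw [str_count_close S]
  generalize S.toList = cs
  by_cases hnil : cs.length = 0
  · rw [if_pos hnil]
    obtain rfl : cs = [] := List.length_eq_zero_iff.mp hnil
    simp
  · rw [if_neg hnil, loopA_eq_g]
    have hTCB : ((cs.filter (fun x => x = ')')).length : Int) = (cs.count ')' : Int) := by
      congr 1
      rw [List.count, List.countP_eq_length_filter]
      congr 1
    rw [hTCB]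
    by_cases h0 : (cs.count ')' : Int) = 0
    · rw [if_pos h0]
      rw [show (cs.count ')' : Int) - 0 - 0 = 0 by omega,
          gLoop_zero cs 0 (cs.length : Int) (by omega)]
    · rw [if_neg h0]
      have ht : 0 < (cs.count ')' : Int) - 0 - 0 := by omega
      have hle : (cs.count ')' : Int) - 0 - 0 ≤ ((posFrom 0 cs).length : Int) := by
        rw [length_posFrom]
        have := count_le_countP cs
        push_cast
        omega
      rw [gLoop_pos cs 0 _ (cs.length : Int) ht hle (by omega),
          filter_enum_eq_posFrom,
          show (cs.count ')' : Int) - 0 - 0 - 1 = (cs.count ')' : Int) - 1 by omega]
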